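-- pv_equiv track=rewrite | github.com/singhgursewak570/python_worksheets | q11.py | is_goal_reached
-- ===== SOURCE A (Python) =====
-- def is_goal_reached(path):
--     x = 0
--     y = 0
--     for p in path:
--         if p == "up":
--             y = y + 1
--         elif p == "down":
--             y = y - 1
--         elif p == "left":
--             x = x - 1
--         elif p == "right":
--             x = x + 1
--     if x == 2 and y == 0:
--         return True
--     else:
--         return False
-- ===== SOURCE B (Python) =====
-- def is_goal_reached(path):
--     # sort-then-scan: group equal tokens into runs and apply each run's count at once
--     s = sorted(path)
--     x = 0
--     y = 0
--     n = len(s)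
--     i = 0
--     while i < n:
--         t = s[i]
--         j = i + 1
--         while j < n and s[j] == t:
--             j += 1
--         k = j - i
--         if t == "up":
--             y += k
--         elif t == "down":
--             y -= k
--         elif t == "left":
--             x -= k
--         elif t == "right":
--             x += k
--         i = j
--     return x == 2 and y == 0
-- ===== Notes on version B (the rewrite author's own statement) =====
-- stated objective: alternative
-- what changed: B sorts the path and scans it run-by-run (two-index while loops over runs of equal tokens), applying each run's length to x or y at once, instead of A's per-element four-way branch; correct because the net displacement depends only on token multiplicities, which sorting preserves.
import Mathlib
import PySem

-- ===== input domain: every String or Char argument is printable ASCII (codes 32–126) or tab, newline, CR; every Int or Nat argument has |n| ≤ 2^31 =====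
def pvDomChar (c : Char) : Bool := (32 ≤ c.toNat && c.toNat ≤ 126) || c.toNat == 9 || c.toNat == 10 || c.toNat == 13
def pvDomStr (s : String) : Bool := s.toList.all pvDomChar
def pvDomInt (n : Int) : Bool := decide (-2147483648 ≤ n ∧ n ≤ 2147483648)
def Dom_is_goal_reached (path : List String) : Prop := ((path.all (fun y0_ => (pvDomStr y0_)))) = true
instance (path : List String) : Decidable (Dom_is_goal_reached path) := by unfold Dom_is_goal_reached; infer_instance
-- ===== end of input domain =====

-- B sorts the path and processes runs of equal tokens in bulk; same return value as A's per-element scan (order of moves is irrelevant).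

-- ===== PORT A =====
-- Port of A: fold over path with (x,y) state, four-way branch.
def is_goal_reached (path : List String) : Bool :=
  let st := path.foldl (fun (s : Int × Int) p =>
    if p == "up" then (s.1, s.2 + 1)
    else if p == "down" then (s.1, s.2 - 1)
    else if p == "left" then (s.1 - 1, s.2)
    else if p == "right" then (s.1 + 1, s.2)
    else s) (0, 0)
  if st.1 = 2 ∧ st.2 = 0 then true else false

-- ===== PORT B =====
-- inner while loop of Source B: advance j while j < n and s[j] == t (fuel = totality guard only)
def pvRunEnd (s : List String) (n : Nat) (t : String) : Nat → Nat → Nat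
  | 0, j => j
  | fuel + 1, j => if j < n && s.getD j "" == t then pvRunEnd s n t fuel (j + 1) else j

-- outer while loop of Source B: i scans run starts, each run's length applied at once
def pvScanRuns (s : List String) (n : Nat) : Nat → Nat → Int → Int → Int × Int
  | 0, _, x, y => (x, y)
  | fuel + 1, i, x, y =>
    if i < n then
      let t := s.getD i ""
      let j := pvRunEnd s n t n (i + 1)
      let k : Int := (j : Int) - (i : Int)
      if t == "up" then pvScanRuns s n fuel j x (y + k)
      else if t == "down" then pvScanRuns s n fuel j x (y - k)
      else if t == "left" then pvScanRuns s n fuel j (x - k) y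
      else if t == "right" then pvScanRuns s n fuel j (x + k) y
      else pvScanRuns s n fuel j x y
    else (x, y)

-- Port of B: sorted path, then run-length scan.
def is_goal_reached_alt (path : List String) : Bool :=
  let s := PySem.List.sorted path (fun z => z) false
  let st := pvScanRuns s s.length s.length 0 0 0
  st.1 == 2 && st.2 == 0

-- ===== PRECONDITION & SPEC =====
def Spec_is_goal_reached (path : List String) (out : Bool) : Prop := out = is_goal_reached_alt path
instance (path : List String) (out : Bool) : Decidable (Spec_is_goal_reached path out) := by unfold Spec_is_goal_reached; infer_instance

-- ===== CLAIM (what is proved, stated in full; the proofs are below) =====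
def Claim_equal_is_goal_reached : Prop := ∀ (path : List String), Dom_is_goal_reached path → Spec_is_goal_reached path (is_goal_reached path)

-- ===== LEMMAS AND PROOFS =====

-- A's fold state equals (x + #right - #left, y + #up - #down).
lemma is_goal_reached_state (path : List String) (x y : Int) :
    path.foldl (fun (s : Int × Int) p =>
      if p == "up" then (s.1, s.2 + 1)
      else if p == "down" then (s.1, s.2 - 1)
      else if p == "left" then (s.1 - 1, s.2)
      else if p == "right" then (s.1 + 1, s.2)
      else s) (x, y)
    = (x + path.count "right" - path.count "left",
       y + path.count "up" - path.count "down") := by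
  induction path generalizing x y with
  | nil => simp
  | cons p rest ih =>
    by_cases hu : p = "up" <;> by_cases hd : p = "down" <;>
      by_cases hl : p = "left" <;> by_cases hr : p = "right" <;>
      simp_all <;> ring_nf

lemma pvRunEnd_ge (s : List String) (n : Nat) (t : String) :
    ∀ fuel j, j ≤ pvRunEnd s n t fuel j := by
  intro fuel
  induction fuel with
  | zero => intro j; simp [pvRunEnd]
  | succ fuel ih =>
    intro j
    rw [pvRunEnd]
    split
    · exact Nat.le_trans (by omega) (ih (j + 1))
    · exact Nat.le_refl j

lemma pvRunEnd_le (s : List String) (n : Nat) (t : String) :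
    ∀ fuel j, j ≤ n → pvRunEnd s n t fuel j ≤ n := by
  intro fuel
  induction fuel with
  | zero => intro j hj; simpa [pvRunEnd] using hj
  | succ fuel ih =>
    intro j hj
    rw [pvRunEnd]
    split
    · next h =>
      rw [Bool.and_eq_true] at h
      have hjn : j < n := by simpa using h.1
      exact ih (j + 1) (by omega)
    · exact hj

lemma pvRunEnd_all (s : List String) (n : Nat) (t : String) :
    ∀ fuel j m, j ≤ m → m < pvRunEnd s n t fuel j → s.getD m "" = t := by
  intro fuel
  induction fuel with
  | zero => intro j m h1 h2; rw [pvRunEnd] at h2; omega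
  | succ fuel ih =>
    intro j m h1 h2
    rw [pvRunEnd] at h2
    split at h2
    · next h =>
      rw [Bool.and_eq_true] at h
      rcases Nat.eq_or_lt_of_le h1 with rfl | h1'
      · exact beq_iff_eq.mp h.2
      · exact ih (j + 1) m h1' h2
    · omega

-- a block of equal elements in s is a replicate prefix of the drop
lemma drop_decomp (s : List String) (t : String) :
    ∀ i j, i ≤ j → j ≤ s.length → (∀ m, i ≤ m → m < j → s.getD m "" = t) →
      s.drop i = List.replicate (j - i) t ++ s.drop j := by
  intro i j hij hj hall
  induction hd : j - i generalizing i with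
  | zero =>
    obtain rfl : i = j := by omega
    simp
  | succ m ih =>
    have hi : i < s.length := by omega
    have hdrop : s.drop i = s[i] :: s.drop (i + 1) := List.drop_eq_getElem_cons hi
    have hgi : s[i] = t := by
      have := hall i (Nat.le_refl i) (by omega)
      rwa [List.getD_eq_getElem s "" hi] at this
    rw [hdrop, hgi, ih (i + 1) (by omega) (fun m h1 h2 => hall m (by omega) h2) (by omega)]
    simp [List.replicate_succ]

def pvDx (l : List String) : Int := (l.count "right" : Int) - (l.count "left" : Int)
def pvDy (l : List String) : Int := (l.count "up" : Int) - (l.count "down" : Int)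

lemma pvScanRuns_eq (s : List String) :
    ∀ fuel i x y, s.length - i ≤ fuel →
      pvScanRuns s s.length fuel i x y = (x + pvDx (s.drop i), y + pvDy (s.drop i)) := by
  intro fuel
  induction fuel with
  | zero =>
    intro i x y hfuel
    have hnil : s.drop i = [] := List.drop_eq_nil_of_le (by omega)
    simp [pvScanRuns, hnil, pvDx, pvDy]
  | succ fuel ih =>
    intro i x y hfuel
    rw [pvScanRuns]
    split
    · next h =>
      have hge := pvRunEnd_ge s s.length (s.getD i "") s.length (i + 1)
      have hle := pvRunEnd_le s s.length (s.getD i "") s.length (i + 1) h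
      have hall : ∀ m, i ≤ m → m < pvRunEnd s s.length (s.getD i "") s.length (i + 1) →
          s.getD m "" = s.getD i "" := by
        intro m h1 h2
        rcases Nat.eq_or_lt_of_le h1 with rfl | h1'
        · rfl
        · exact pvRunEnd_all s s.length (s.getD i "") s.length (i + 1) m h1' h2
      have hcount : ∀ u : String, (s.drop i).count u =
          (if s.getD i "" = u then pvRunEnd s s.length (s.getD i "") s.length (i + 1) - i else 0)
            + (s.drop (pvRunEnd s s.length (s.getD i "") s.length (i + 1))).count u := by
        intro u
        rw [drop_decomp s (s.getD i "") i (pvRunEnd s s.length (s.getD i "") s.length (i + 1))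
              (by omega) hle hall,
          List.count_append, List.count_replicate]
        by_cases h' : s.getD i "" = u
        · subst h'; simp
        · simp [(Ne.symm h' : u ≠ s.getD i "")]
      have h1 := hcount "right"
      have h2 := hcount "left"
      have h3 := hcount "up"
      have h4 := hcount "down"
      have hih := fun j x y (hj : s.length - j ≤ fuel) => ih j x y hj
      dsimp only
      split_ifs with hu hd hl hr
      · -- t = "up"
        rw [beq_iff_eq] at hu
        rw [hih _ _ _ (by omega)]
        simp only [hu] at h1 h2 h3 h4 hge ⊢
        simp at h1 h2 h3 h4
        simp only [pvDx, pvDy, Prod.mk.injEq]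
        constructor <;> omega
      · -- t = "down"
        rw [beq_iff_eq] at hd
        rw [hih _ _ _ (by omega)]
        simp only [hd] at h1 h2 h3 h4 hge ⊢
        simp at h1 h2 h3 h4
        simp only [pvDx, pvDy, Prod.mk.injEq]
        constructor <;> omega
      · -- t = "left"
        rw [beq_iff_eq] at hl
        rw [hih _ _ _ (by omega)]
        simp only [hl] at h1 h2 h3 h4 hge ⊢
        simp at h1 h2 h3 h4
        simp only [pvDx, pvDy, Prod.mk.injEq]
        constructor <;> omega
      · -- t = "right"
        rw [beq_iff_eq] at hr
        rw [hih _ _ _ (by omega)]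
        simp only [hr] at h1 h2 h3 h4 hge ⊢
        simp at h1 h2 h3 h4
        simp only [pvDx, pvDy, Prod.mk.injEq]
        constructor <;> omega
      · -- t matches none of the four tokens
        rw [hih _ _ _ (by omega)]
        simp only [beq_iff_eq] at hu hd hl hr
        rw [if_neg hr] at h1
        rw [if_neg hl] at h2
        rw [if_neg hu] at h3
        rw [if_neg hd] at h4
        simp only [pvDx, pvDy, Prod.mk.injEq]
        constructor <;> omega
    · next h =>
      have hnil : s.drop i = [] := List.drop_eq_nil_of_le (by omega)
      simp [hnil, pvDx, pvDy]

theorem is_goal_reached_spec : Claim_equal_is_goal_reached := by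
  intro path _
  show is_goal_reached path = is_goal_reached_alt path
  have hperm : (PySem.List.sorted path (fun z => z) false).Perm path :=
    PySem.List.sorted_perm path (fun z => z) false
  have hB := pvScanRuns_eq (PySem.List.sorted path (fun z => z) false)
    ((PySem.List.sorted path (fun z => z) false).length) 0 0 0 (by omega)
  simp only [is_goal_reached, is_goal_reached_alt, is_goal_reached_state, hB,
    List.drop_zero, pvDx, pvDy, hperm.count_eq]
  split_ifs with h
  · obtain ⟨h1, h2⟩ := h
    symm; rw [Bool.and_eq_true]
    constructor <;> [exact beq_iff_eq.mpr (by omega); exact beq_iff_eq.mpr (by omega)]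
  · symm; rw [Bool.and_eq_false_iff]
    by_cases hx : (0 : Int) + (path.count "right" : Int) - (path.count "left" : Int) = 2
    · right; simp only [beq_eq_false_iff_ne, ne_eq]; omega
    · left; simp only [beq_eq_false_iff_ne, ne_eq]; omega
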